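-- pv_equiv track=rewrite | github.com/OCHKANOV12/scontrols | maze_game.py | calculate_grid
-- ===== SOURCE A (Python) =====
-- def calculate_grid(width, height, min_cell_size):
--     max_cols = width // min_cell_size
--     max_rows = height // min_cell_size
--     best_cell_size = min_cell_size
--     best_cols = max_cols
--     best_rows = max_rows
--     for size in range(min_cell_size, min(width, height) + 1):
--         cols = width // size
--         rows = height // size
--         if cols == 0 or rows == 0:
--             break
--         area_covered = cols * size * rows * size
--         best_area = best_cols * best_cell_size * best_rows * best_cell_size
--         if area_covered > best_area:
--             best_cell_size = size
--             best_cols = cols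
--             best_rows = rows
--     return best_cols, best_rows, best_cell_size
-- ===== SOURCE B (Python) =====
-- def calculate_grid(width, height, min_cell_size):
--     best_cols = width // min_cell_size
--     best_rows = height // min_cell_size
--     best_cell_size = min_cell_size
--     limit = min(width, height)
--     s = min_cell_size
--     while s <= limit:
--         cols = width // s
--         rows = height // s
--         # largest size with the same (cols, rows); area grows within the block
--         top = min(width // cols, height // rows, limit)
--         if cols * rows * top * top > best_cols * best_cell_size * best_rows * best_cell_size:
--             best_cols, best_rows, best_cell_size = cols, rows, top
--         s = top + 1
--     return best_cols, best_rows, best_cell_size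
-- ===== Notes on version B (the rewrite author's own statement) =====
-- stated objective: faster
-- what changed: Instead of trying every cell size, B jumps between floor-division blocks (maximal runs of sizes with the same cols/rows counts) and evaluates each block only at its largest size, where the covered area within the block is maximal.
-- outside the precondition, e.g. on calculate_grid(-1, -1, -3): A returns (0, 0, -3), B raises ZeroDivisionError
import Mathlib
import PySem

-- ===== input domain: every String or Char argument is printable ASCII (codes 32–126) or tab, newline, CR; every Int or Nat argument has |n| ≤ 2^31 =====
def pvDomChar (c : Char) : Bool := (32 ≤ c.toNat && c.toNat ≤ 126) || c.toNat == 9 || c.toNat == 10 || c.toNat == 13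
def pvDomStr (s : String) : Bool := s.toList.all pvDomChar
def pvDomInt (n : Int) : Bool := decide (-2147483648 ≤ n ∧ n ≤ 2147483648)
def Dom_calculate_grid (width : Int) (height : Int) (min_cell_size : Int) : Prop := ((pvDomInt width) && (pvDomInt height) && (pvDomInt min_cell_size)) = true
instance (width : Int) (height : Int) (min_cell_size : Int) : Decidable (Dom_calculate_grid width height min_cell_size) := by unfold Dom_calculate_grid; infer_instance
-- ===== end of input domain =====

-- B replaces A's scan of every candidate cell size by jumps between floor-division
-- blocks, evaluating each block only at its largest size (objective: faster).


-- ===== PORT A =====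
-- loop state: (done, best_cell_size, best_cols, best_rows); 'done' transliterates the 'break'
def gridStepA (width height : Int) (st : Bool × Int × Int × Int) (size : Int) :
    Bool × Int × Int × Int :=
  match st with
  | (done, bs, bc, br) =>
    if done then (done, bs, bc, br) else
    let cols := PySem.Int.floordiv width size
    let rows := PySem.Int.floordiv height size
    if cols = 0 ∨ rows = 0 then (true, bs, bc, br)
    else
      let area_covered := cols * size * rows * size
      let best_area := bc * bs * br * bs
      if area_covered > best_area then (false, size, cols, rows) else (done, bs, bc, br)

def calculate_grid (width : Int) (height : Int) (min_cell_size : Int) : List Int :=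
  let max_cols := PySem.Int.floordiv width min_cell_size
  let max_rows := PySem.Int.floordiv height min_cell_size
  let st := (PySem.List.pyRange min_cell_size (min width height + 1) 1).foldl
      (gridStepA width height) (false, min_cell_size, max_cols, max_rows)
  [st.2.2.1, st.2.2.2, st.2.1]

-- ===== PORT B =====
-- B's while loop; fuel bounds the iteration count (s strictly increases each turn)
def gridLoopB (width height limit : Int) :
    Nat → Int → Int → Int → Int → Int × Int × Int
  | 0, _, bc, br, bs => (bc, br, bs)
  | fuel + 1, s, bc, br, bs =>
    if s ≤ limit then
      let cols := PySem.Int.floordiv width s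
      let rows := PySem.Int.floordiv height s
      let top := min (min (PySem.Int.floordiv width cols) (PySem.Int.floordiv height rows)) limit
      if cols * rows * top * top > bc * bs * br * bs then
        gridLoopB width height limit fuel (top + 1) cols rows top
      else
        gridLoopB width height limit fuel (top + 1) bc br bs
    else (bc, br, bs)

def calculate_grid_alt (width : Int) (height : Int) (min_cell_size : Int) : List Int :=
  let bc := PySem.Int.floordiv width min_cell_size
  let br := PySem.Int.floordiv height min_cell_size
  let limit := min width height
  let out := gridLoopB width height limit (limit + 1 - min_cell_size).toNat
      min_cell_size bc br min_cell_size
  [out.1, out.2.1, out.2.2]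

-- ===== PRECONDITION & SPEC =====
-- Pre_ excludes min_cell_size < 1: there A raises ZeroDivisionError once the loop reaches
-- size 0 (or immediately for min_cell_size = 0), and where A does return (negative cell
-- sizes with negative width/height) a cell size below 1 is meaningless and B itself raises
-- on part of that region.
def Pre_calculate_grid (width : Int) (height : Int) (min_cell_size : Int) : Prop :=
  1 ≤ min_cell_size
instance (width : Int) (height : Int) (min_cell_size : Int) : Decidable (Pre_calculate_grid width height min_cell_size) := by unfold Pre_calculate_grid; infer_instance
def pvWitness_calculate_grid : Int × Int × Int := (8, 6, 2)

def Spec_calculate_grid (width : Int) (height : Int) (min_cell_size : Int) (out : List Int) : Prop := out = calculate_grid_alt width height min_cell_size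
instance (width : Int) (height : Int) (min_cell_size : Int) (out : List Int) : Decidable (Spec_calculate_grid width height min_cell_size out) := by unfold Spec_calculate_grid; infer_instance

-- ===== CLAIM (what is proved, stated in full; the proofs are below) =====
def Claim_equal_calculate_grid : Prop := ∀ (width : Int) (height : Int) (min_cell_size : Int), Dom_calculate_grid width height min_cell_size → Pre_calculate_grid width height min_cell_size → Spec_calculate_grid width height min_cell_size (calculate_grid width height min_cell_size)

-- ===== LEMMAS AND PROOFS =====

-- 1 ≤ w // s when 1 ≤ s ≤ w
theorem pv_fd_pos (w s : Int) (h1 : 1 ≤ s) (h2 : s ≤ w) :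
    1 ≤ PySem.Int.floordiv w s :=
  (PySem.Int.le_floordiv_iff_mul_le (by omega)).mpr (by omega)

-- s ≤ w // (w // s) when 1 ≤ s ≤ w
theorem pv_le_fd_fd (w s : Int) (h1 : 1 ≤ s) (h2 : s ≤ w) :
    s ≤ PySem.Int.floordiv w (PySem.Int.floordiv w s) := by
  have hc := pv_fd_pos w s h1 h2
  have h := (PySem.Int.floordiv_eq_iff_of_pos (a := w) (b := s) (by omega)).mp rfl
  exact (PySem.Int.le_floordiv_iff_mul_le (by omega)).mpr (by nlinarith [h.1])

-- w // x is constant on the block [s, w // (w // s)]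
theorem pv_fd_const (w s x : Int) (h1 : 1 ≤ s) (hsx : s ≤ x)
    (hx : x ≤ PySem.Int.floordiv w (PySem.Int.floordiv w s)) (hsw : s ≤ w) :
    PySem.Int.floordiv w x = PySem.Int.floordiv w s := by
  have hc : 1 ≤ PySem.Int.floordiv w s := pv_fd_pos w s h1 hsw
  have h := (PySem.Int.floordiv_eq_iff_of_pos (a := w) (b := s) (by omega)).mp rfl
  have hxc : x * PySem.Int.floordiv w s ≤ w :=
    (PySem.Int.le_floordiv_iff_mul_le (by omega)).mp hx
  refine (PySem.Int.floordiv_eq_iff_of_pos (by omega)).mpr ⟨by nlinarith, ?_⟩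
  calc w < (PySem.Int.floordiv w s + 1) * s := h.2
    _ ≤ (PySem.Int.floordiv w s + 1) * x := by nlinarith

-- evaluating one iteration of A's loop body on a live state
theorem gridStepA_eval (w h bs bc br s c r : Int)
    (hw : PySem.Int.floordiv w s = c) (hh : PySem.Int.floordiv h s = r)
    (hc : 1 ≤ c) (hr : 1 ≤ r) :
    gridStepA w h (false, bs, bc, br) s
      = if c * s * r * s > bc * bs * br * bs then ((false : Bool), s, c, r)
        else ((false : Bool), bs, bc, br) := by
  simp only [gridStepA, hw, hh, Bool.false_eq_true, if_false]
  rw [if_neg (by omega : ¬(c = 0 ∨ r = 0))]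

-- A's fold over one whole floor-division block [s, top] reduces to a single
-- comparison against the block's largest size
theorem pv_blockFold (w h c r top : Int) (hc : 1 ≤ c) (hr : 1 ≤ r) :
    ∀ (n : Nat) (s : Int), (top - s).toNat = n → 1 ≤ s → s ≤ top →
    (∀ x, s ≤ x → x ≤ top →
        PySem.Int.floordiv w x = c ∧ PySem.Int.floordiv h x = r) →
    ∀ bs bc br : Int,
    (PySem.List.pyRange s (top + 1) 1).foldl (gridStepA w h) (false, bs, bc, br)
      = if c * top * r * top > bc * bs * br * bs then ((false : Bool), top, c, r)
        else ((false : Bool), bs, bc, br) := by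
  intro n
  induction n with
  | zero =>
    intro s hn h1 h2 hcst bs bc br
    have hst : s = top := by omega
    subst hst
    rw [PySem.List.pyRange_one_cons (by omega), PySem.List.pyRange_one_eq_nil (by omega)]
    obtain ⟨hw, hh⟩ := hcst s le_rfl le_rfl
    simp only [List.foldl_cons, List.foldl_nil]
    rw [gridStepA_eval w h bs bc br s c r hw hh hc hr]
  | succ n ih =>
    intro s hn h1 h2 hcst bs bc br
    have hlt : s < top := by omega
    rw [PySem.List.pyRange_one_cons (by omega)]
    simp only [List.foldl_cons]
    obtain ⟨hw, hh⟩ := hcst s le_rfl h2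
    rw [gridStepA_eval w h bs bc br s c r hw hh hc hr]
    have hcst' : ∀ x, s + 1 ≤ x → x ≤ top →
        PySem.Int.floordiv w x = c ∧ PySem.Int.floordiv h x = r :=
      fun x hx1 hx2 => hcst x (by omega) hx2
    have hcr : (0 : Int) < c * r := by positivity
    have hss : s * s < top * top := by nlinarith
    have harea : c * s * r * s < c * top * r * top := by
      calc c * s * r * s = c * r * (s * s) := by ring
        _ < c * r * (top * top) := by exact mul_lt_mul_of_pos_left hss hcr
        _ = c * top * r * top := by ring
    by_cases hupd : c * s * r * s > bc * bs * br * bs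
    · rw [if_pos hupd]
      rw [ih (s + 1) (by omega) (by omega) (by omega) hcst' s c r]
      rw [if_pos harea, if_pos (lt_trans hupd harea)]
    · rw [if_neg hupd]
      exact ih (s + 1) (by omega) (by omega) (by omega) hcst' bs bc br

-- main loop correspondence: A's fold from size s equals B's block loop from s
theorem pv_mainLoop (w h : Int) :
    ∀ (fuel : Nat) (s bc br bs : Int), 1 ≤ s → (min w h + 1 - s).toNat ≤ fuel →
    (PySem.List.pyRange s (min w h + 1) 1).foldl (gridStepA w h) (false, bs, bc, br)
      = ((false : Bool), (gridLoopB w h (min w h) fuel s bc br bs).2.2,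
         (gridLoopB w h (min w h) fuel s bc br bs).1,
         (gridLoopB w h (min w h) fuel s bc br bs).2.1) := by
  intro fuel
  induction fuel with
  | zero =>
    intro s bc br bs h1 hf
    rw [PySem.List.pyRange_one_eq_nil (by omega)]
    simp [gridLoopB]
  | succ fuel ih =>
    intro s bc br bs h1 hf
    by_cases hsl : s ≤ min w h
    · have hsw : s ≤ w := le_trans hsl (min_le_left w h)
      have hsh : s ≤ h := le_trans hsl (min_le_right w h)
      simp only [gridLoopB, if_pos hsl]
      set c := PySem.Int.floordiv w s with hc'
      set r := PySem.Int.floordiv h s with hr'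
      set top := min (min (PySem.Int.floordiv w c) (PySem.Int.floordiv h r)) (min w h)
        with htop'
      have hc : 1 ≤ c := pv_fd_pos w s h1 hsw
      have hr : 1 ≤ r := pv_fd_pos h s h1 hsh
      have hstop : s ≤ top :=
        le_min (le_min (pv_le_fd_fd w s h1 hsw) (pv_le_fd_fd h s h1 hsh)) hsl
      have htoplim : top ≤ min w h := min_le_right _ _
      have hcst : ∀ x, s ≤ x → x ≤ top →
          PySem.Int.floordiv w x = c ∧ PySem.Int.floordiv h x = r := by
        intro x hx1 hx2
        constructor
        · exact pv_fd_const w s x h1 hx1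
            (le_trans hx2 (le_trans (min_le_left _ _) (min_le_left _ _))) hsw
        · exact pv_fd_const h s x h1 hx1
            (le_trans hx2 (le_trans (min_le_left _ _) (min_le_right _ _))) hsh
      rw [PySem.List.pyRange_one_append s (top + 1) (min w h + 1) (by omega) (by omega)]
      rw [List.foldl_append]
      rw [pv_blockFold w h c r top hc hr (top - s).toNat s rfl h1 hstop hcst bs bc br]
      rw [show c * top * r * top = c * r * top * top from by ring]
      by_cases hcond : c * r * top * top > bc * bs * br * bs
      · rw [if_pos hcond, if_pos hcond]
        exact ih (top + 1) c r top (by omega) (by omega)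
      · rw [if_neg hcond, if_neg hcond]
        exact ih (top + 1) bc br bs (by omega) (by omega)
    · rw [PySem.List.pyRange_one_eq_nil (by omega)]
      simp only [gridLoopB, if_neg hsl, List.foldl_nil]

-- ===== VERDICT (by name: the statement is the Claim_ definition above) =====
theorem calculate_grid_spec : Claim_equal_calculate_grid := by
  intro w h m hdom hpre
  have hm : 1 ≤ m := hpre
  simp only [Spec_calculate_grid, calculate_grid, calculate_grid_alt]
  rw [pv_mainLoop w h ((min w h + 1 - m).toNat) m
      (PySem.Int.floordiv w m) (PySem.Int.floordiv h m) m hm le_rfl]
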